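-- pv_equiv track=rewrite | github.com/vishwajameddela18/CP | 03-recursion_onlyevendigits-Python/recursion_onlyevendigits.py | isdigit_even
-- ===== SOURCE A (Python) =====
-- def isdigit_even(n, s=0):
--     if n == 0:
--         return s
--     else:
--         if (n % 10) % 2 == 0:
--             return isdigit_even(n // 10, s=(s * 10) + (n % 10))
--         else:
--             return isdigit_even(n // 10, s)
-- ===== SOURCE B (Python) =====
-- def isdigit_even(n, s=0):
--     evens = []
--     while n != 0:
--         d = n % 10
--         if d % 2 == 0:
--             evens.append(d)
--         n //= 10
--     for d in evens:
--         s = s * 10 + d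
--     return s
-- ===== Notes on version B (the rewrite author's own statement) =====
-- stated objective: alternative
-- what changed: Replaces the tail recursion that threads the accumulator through every call by a two-phase iteration: a while loop that first collects the even digits (least-significant first) into a list, then a fold that combines them into the result.
import Mathlib
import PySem

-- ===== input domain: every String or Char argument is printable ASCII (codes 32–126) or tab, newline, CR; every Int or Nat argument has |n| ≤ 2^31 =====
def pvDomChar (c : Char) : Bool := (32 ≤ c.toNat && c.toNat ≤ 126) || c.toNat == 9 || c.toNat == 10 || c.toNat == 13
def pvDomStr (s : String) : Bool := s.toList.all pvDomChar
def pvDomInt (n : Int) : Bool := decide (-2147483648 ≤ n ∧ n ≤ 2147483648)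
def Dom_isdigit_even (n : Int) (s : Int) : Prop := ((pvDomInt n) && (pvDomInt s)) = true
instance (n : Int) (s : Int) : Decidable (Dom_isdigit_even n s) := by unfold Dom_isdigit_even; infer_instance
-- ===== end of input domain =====

-- B replaces A's accumulator-threading tail recursion by a two-phase iteration:
-- collect the even digits into a list, then fold them into the result.


-- ===== PORT A =====
-- literal transliteration of A's tail recursion; the 'n ≤ 0' guard only makes the
-- recursion total (Python never terminates for n < 0, which Pre_ excludes)
def isdigit_even (n : Int) (s : Int) : Int :=
  if _h : n ≤ 0 then s
  else if PySem.Int.mod (PySem.Int.mod n 10) 2 = 0 then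
    isdigit_even (PySem.Int.floordiv n 10) (s * 10 + PySem.Int.mod n 10)
  else
    isdigit_even (PySem.Int.floordiv n 10) s
termination_by n.toNat
decreasing_by
  rw [PySem.Int.floordiv_eq_ediv_of_pos (by norm_num : (0:Int) < 10)]; omega
  rw [PySem.Int.floordiv_eq_ediv_of_pos (by norm_num : (0:Int) < 10)]; omega

-- ===== PORT B =====
-- the while loop of Source B that appends each even digit to 'evens'
def pvCollect (n : Int) (evens : List Int) : List Int :=
  if _h : n ≤ 0 then evens
  else
    let d := PySem.Int.mod n 10
    pvCollect (PySem.Int.floordiv n 10)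
      (if PySem.Int.mod d 2 = 0 then evens ++ [d] else evens)
termination_by n.toNat
decreasing_by
  rw [PySem.Int.floordiv_eq_ediv_of_pos (by norm_num : (0:Int) < 10)]; omega

-- the for loop of Source B folding the collected digits onto the seed s
def isdigit_even_alt (n : Int) (s : Int) : Int :=
  (pvCollect n []).foldl (fun acc d => acc * 10 + d) s

-- ===== PRECONDITION & SPEC =====
-- Pre_ excludes n < 0, on which Python A never returns (RecursionError: n//10 stalls at -1).
def Pre_isdigit_even (n : Int) (s : Int) : Prop := 0 ≤ n
instance (n : Int) (s : Int) : Decidable (Pre_isdigit_even n s) := by unfold Pre_isdigit_even; infer_instance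
def pvWitness_isdigit_even : Int × Int := (1234, 0)

def Spec_isdigit_even (n : Int) (s : Int) (out : Int) : Prop := out = isdigit_even_alt n s
instance (n : Int) (s : Int) (out : Int) : Decidable (Spec_isdigit_even n s out) := by unfold Spec_isdigit_even; infer_instance

-- ===== CLAIM (what is proved, stated in full; the proofs are below) =====
def Claim_equal_isdigit_even : Prop := ∀ (n : Int) (s : Int), Dom_isdigit_even n s → Pre_isdigit_even n s → Spec_isdigit_even n s (isdigit_even n s)

-- ===== LEMMAS AND PROOFS =====

-- the collecting loop's accumulator is a prefix of its final result
theorem pvCollect_append (n : Int) (acc : List Int) :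
    pvCollect n acc = acc ++ pvCollect n [] := by
  by_cases h : n ≤ 0
  · conv_lhs => rw [pvCollect]
    conv_rhs => rw [pvCollect]
    simp [h]
  · conv_lhs => rw [pvCollect]
    conv_rhs => rw [pvCollect]
    simp only [h, dif_neg, not_false_iff]
    rw [pvCollect_append (PySem.Int.floordiv n 10)
        (if PySem.Int.mod (PySem.Int.mod n 10) 2 = 0 then acc ++ [PySem.Int.mod n 10] else acc),
      pvCollect_append (PySem.Int.floordiv n 10)
        (if PySem.Int.mod (PySem.Int.mod n 10) 2 = 0 then [] ++ [PySem.Int.mod n 10] else ([]:List Int))]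
    split_ifs <;> simp
termination_by n.toNat
decreasing_by
  all_goals rw [PySem.Int.floordiv_eq_ediv_of_pos (by norm_num : (0:Int) < 10)]; omega

-- A's recursion computes exactly the fold of the collected even digits
theorem isdigit_even_eq_fold (n : Int) (s : Int) :
    isdigit_even n s = (pvCollect n []).foldl (fun acc d => acc * 10 + d) s := by
  by_cases h : n ≤ 0
  · conv_lhs => rw [isdigit_even]
    conv_rhs => rw [pvCollect]
    simp [h]
  · conv_lhs => rw [isdigit_even]
    conv_rhs => rw [pvCollect]
    simp only [h, dif_neg, not_false_iff]
    rw [pvCollect_append]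
    by_cases he : PySem.Int.mod (PySem.Int.mod n 10) 2 = 0
    · simp only [he, if_pos]
      rw [isdigit_even_eq_fold (PySem.Int.floordiv n 10) (s * 10 + PySem.Int.mod n 10)]
      simp
    · simp only [he, if_neg, not_false_iff]
      rw [isdigit_even_eq_fold (PySem.Int.floordiv n 10) s]
      simp
termination_by n.toNat
decreasing_by
  all_goals rw [PySem.Int.floordiv_eq_ediv_of_pos (by norm_num : (0:Int) < 10)]; omega

-- ===== VERDICT (by name: the statement is the Claim_ definition above) =====
theorem isdigit_even_spec : Claim_equal_isdigit_even := by
  intro n s _ _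
  unfold Spec_isdigit_even isdigit_even_alt
  exact isdigit_even_eq_fold n s
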